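-- pv_equiv track=rewrite | github.com/JaeYeonLee0621/algorithm | programmers/level1/신고_결과_받기.py | solution
-- ===== SOURCE A (Python) =====
-- def solution(id_list, report, k):
--     id_index = {}
--     for index, id in enumerate(id_list):
--         id_index[id] = index
--
--     receive_id_indexes = {}
--     for report_ids in report:
--         give_id, receive_id = report_ids.split(' ')
--         receive_id_index = id_index[receive_id]
--         give_id_index = id_index[give_id]
--         if not receive_id_indexes.get(receive_id_index):
--             receive_id_indexes[receive_id_index] = [give_id_index]
--         else:
--             receive_id_indexes[receive_id_index].append(give_id_index)
--
--     answer = [0 for _ in range(len(id_list))]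
--     for _, give_id_indexes in receive_id_indexes.items():
--         give_id_indexes_remove_duplicate = set(give_id_indexes)
--         if len(give_id_indexes_remove_duplicate) < k:
--             continue
--         for give_id_index in give_id_indexes_remove_duplicate:
--             answer[give_id_index] += 1
--
--     return answer
-- ===== SOURCE B (Python) =====
-- def solution(id_list, report, k):
--     idx = {u: i for i, u in enumerate(id_list)}
--     pairs = {(idx[g], idx[r]) for g, r in (s.split(' ') for s in report)}
--     banned = {r for (_, r) in pairs
--               if sum(1 for (g2, r2) in pairs if r2 == r) >= k}
--     return [sum(1 for (g, r) in pairs if g == i and r in banned)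
--             for i in range(len(id_list))]
-- ===== Notes on version B (the rewrite author's own statement) =====
-- stated objective: alternative
-- what changed: Drops A's receiver-keyed dict of giver lists and its scatter-increment pass entirely: B builds one deduped pair set, computes the banned receivers by a nested count over that set, and fills each answer slot directly with a count over the pair set (no grouping dict, no counters, no in-place increments).
import Mathlib
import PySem

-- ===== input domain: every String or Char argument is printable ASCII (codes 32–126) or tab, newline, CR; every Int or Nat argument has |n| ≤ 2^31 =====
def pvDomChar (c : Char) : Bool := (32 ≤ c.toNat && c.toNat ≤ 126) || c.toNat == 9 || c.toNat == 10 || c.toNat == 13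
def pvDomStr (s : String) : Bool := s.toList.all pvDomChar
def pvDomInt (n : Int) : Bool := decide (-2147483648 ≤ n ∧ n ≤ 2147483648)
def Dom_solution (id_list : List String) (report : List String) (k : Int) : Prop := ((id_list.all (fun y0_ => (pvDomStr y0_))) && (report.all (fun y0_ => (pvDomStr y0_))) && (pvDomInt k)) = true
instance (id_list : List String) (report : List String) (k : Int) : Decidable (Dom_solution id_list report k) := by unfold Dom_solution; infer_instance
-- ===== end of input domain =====

-- B drops A's receiver-keyed dict of giver lists and its scatter-increment pass: it builds one
-- deduped pair set, computes the banned receivers by a nested count over that set, and fills each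
-- answer slot directly with a count over the pair set ("alternative"; B is quadratic in the
-- number of reports, not claimed faster).

-- ===== PORT A =====
def solution (id_list : List String) (report : List String) (k : Int) : List Int :=
  -- id_index[id] = index  (enumerate; later duplicates overwrite)
  let id_index : PySem.Dict String Int :=
    (PySem.List.enumerate id_list).foldl (fun d p => d.insert p.2 p.1) PySem.Dict.empty
  -- receive_id_indexes: receiver index -> list of giver indexes (with duplicates)
  let receive_id_indexes : PySem.Dict Int (List Int) :=
    report.foldl (fun d s =>
      match PySem.Str.split? s " " with   -- give_id, receive_id = report_ids.split(' '); Pre_ excludes ≠ 2 parts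
      | some [give_id, receive_id] =>
        let receive_id_index := d.get? (id_index.getD receive_id 0)   -- KeyError excluded by Pre_
        let gi := id_index.getD give_id 0
        let ri := id_index.getD receive_id 0
        match receive_id_index with      -- 'if not d.get(ri)': None or [] both take the first branch
        | none => d.insert ri [gi]
        | some l => if l = [] then d.insert ri [gi] else d.insert ri (l ++ [gi])
      | _ => d) PySem.Dict.empty
  let answer : List Int := (PySem.List.pyRange 0 (PySem.List.len id_list) 1).map (fun _ => (0 : Int))
  -- iterating set(give_id_indexes) only performs += 1 at each member: result is order-independent,
  -- so folding in PySem.Set's first-insertion order computes what Python computes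
  receive_id_indexes.items.foldl (fun ans p =>
    let dedup := PySem.Set.ofList p.2
    if (dedup.length : Int) < k then ans
    else dedup.foldl (fun a g => PySem.List.pySetD a g (PySem.List.pyGetD a g 0 + 1)) ans) answer

-- ===== PORT B =====
def solution_alt (id_list : List String) (report : List String) (k : Int) : List Int :=
  let idx : PySem.Dict String Int :=
    (PySem.List.enumerate id_list).foldl (fun d p => d.insert p.2 p.1) PySem.Dict.empty
  -- set comprehension over the generator of split pairs; a line with ≠ 2 parts (Python:
  -- ValueError on unpacking) is excluded by Pre_
  let pairs : PySem.Set (Int × Int) :=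
    PySem.Set.ofList (report.map (fun s =>
      let parts := (PySem.Str.split? s " ").getD []
      (idx.getD (parts.getD 0 "") 0, idx.getD (parts.getD 1 "") 0)))
  -- banned = {r for (_, r) in pairs if sum(1 for (g2, r2) in pairs if r2 == r) >= k}
  -- (sum of 1 over a filtered set = length of the filter; order-independent)
  let banned : PySem.Set Int :=
    PySem.Set.ofList ((pairs.filter (fun p =>
      decide (k ≤ ((pairs.filter (fun q => q.2 == p.2)).length : Int)))).map (fun p => p.2))
  (PySem.List.pyRange 0 (PySem.List.len id_list) 1).map (fun i =>
    ((pairs.filter (fun p => p.1 == i && banned.contains p.2)).length : Int))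

-- ===== PRECONDITION & SPEC =====
-- Pre_ excludes exactly the inputs on which A raises: a report string that does not split on ' '
-- into exactly two parts (ValueError), or mentions an id absent from id_list (KeyError).
def Pre_solution (id_list : List String) (report : List String) (k : Int) : Prop :=
  ∀ s ∈ report, ((PySem.Str.split? s " ").getD []).length = 2 ∧
    ∀ t ∈ (PySem.Str.split? s " ").getD [], t ∈ id_list
instance (id_list : List String) (report : List String) (k : Int) : Decidable (Pre_solution id_list report k) := by
  unfold Pre_solution; infer_instance

def pvWitness_solution : List String × List String × Int := (["muzi", "frodo"], ["muzi frodo"], 1)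

def Spec_solution (id_list : List String) (report : List String) (k : Int) (out : List Int) : Prop := out = solution_alt id_list report k
instance (id_list : List String) (report : List String) (k : Int) (out : List Int) : Decidable (Spec_solution id_list report k out) := by unfold Spec_solution; infer_instance

-- ===== CLAIM (what is proved, stated in full; the proofs are below) =====
def Claim_equal_solution : Prop := ∀ (id_list : List String) (report : List String) (k : Int), Dom_solution id_list report k → Pre_solution id_list report k → Spec_solution id_list report k (solution id_list report k)

-- ===== LEMMAS AND PROOFS =====

-- shared index dict and parsing of one report line into (giver index, receiver index)
def pvIdx (id_list : List String) : PySem.Dict String Int :=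
  (PySem.List.enumerate id_list).foldl (fun d p => d.insert p.2 p.1) PySem.Dict.empty

def pvParse (idx : PySem.Dict String Int) (s : String) : Int × Int :=
  match PySem.Str.split? s " " with
  | some [g, r] => (idx.getD g 0, idx.getD r 0)
  | _ => (0, 0)

-- givers (with duplicates) that reported receiver r, in report order
def pvGivers (E : List (Int × Int)) (r : Int) : List Int :=
  (E.filter (fun p => p.2 == r)).map (fun p => p.1)

lemma pv_mem_givers (E : List (Int × Int)) (r g : Int) : g ∈ pvGivers E r ↔ (g, r) ∈ E := by
  simp only [pvGivers, List.mem_map, List.mem_filter, beq_iff_eq]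
  constructor
  · rintro ⟨⟨a, b⟩, ⟨hm, hb⟩, ha⟩; simp_all
  · intro h; exact ⟨(g, r), ⟨h, rfl⟩, rfl⟩

lemma pv_split_two {s : String} (h : ((PySem.Str.split? s " ").getD []).length = 2) :
    ∃ g r, PySem.Str.split? s " " = some [g, r] := by
  cases hs : PySem.Str.split? s " " with
  | none => rw [hs] at h; simp at h
  | some l =>
    rw [hs] at h; simp at h
    match l, h with
    | [g, r], _ => exact ⟨g, r, rfl⟩

-- A's grouping loop is the modify/append fold over the parsed pairs
lemma pv_portA_dict (id_list : List String) (report : List String)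
    (hpre : ∀ s ∈ report, ((PySem.Str.split? s " ").getD []).length = 2) :
    report.foldl (fun d s =>
      match PySem.Str.split? s " " with
      | some [give_id, receive_id] =>
        match d.get? ((pvIdx id_list).getD receive_id 0) with
        | none => d.insert ((pvIdx id_list).getD receive_id 0) [(pvIdx id_list).getD give_id 0]
        | some l =>
          if l = [] then d.insert ((pvIdx id_list).getD receive_id 0) [(pvIdx id_list).getD give_id 0]
          else d.insert ((pvIdx id_list).getD receive_id 0) (l ++ [(pvIdx id_list).getD give_id 0])
      | _ => d) PySem.Dict.empty
    = (report.map (pvParse (pvIdx id_list))).foldl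
        (fun d q => d.modify q.2 [] (· ++ [q.1])) PySem.Dict.empty := by
  rw [List.foldl_map]
  apply PySem.List.foldl_congr_mem
  intro d s hs
  obtain ⟨g, r, hsplit⟩ := pv_split_two (hpre s hs)
  simp only [hsplit, pvParse]
  unfold PySem.Dict.modify
  rw [PySem.Dict.getD_eq_get?_getD d ((pvIdx id_list).getD r 0) []]
  cases hg : d.get? ((pvIdx id_list).getD r 0) with
  | none => simp
  | some l =>
    by_cases hl : l = []
    · subst hl; simp
    · simp [hl]

lemma pv_idx_values (l : List (Int × String)) (d : PySem.Dict String Int) (N : Int)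
    (hl : ∀ p ∈ l, 0 ≤ p.1 ∧ p.1 < N)
    (hd : ∀ u v, d.get? u = some v → 0 ≤ v ∧ v < N) :
    ∀ u v, (l.foldl (fun d p => d.insert p.2 p.1) d).get? u = some v → 0 ≤ v ∧ v < N := by
  induction l generalizing d with
  | nil => exact hd
  | cons p l ih =>
    rw [List.foldl_cons]
    apply ih _ (fun q hq => hl q (List.mem_cons_of_mem _ hq))
    intro u v h
    rw [PySem.Dict.get?_insert] at h
    split at h
    · cases h; exact hl p (List.mem_cons_self ..)
    · exact hd u v h

-- every value stored in pvIdx is a valid position of id_list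
lemma pv_idx_range (id_list : List String) (u : String) (hu : u ∈ id_list) :
    0 ≤ (pvIdx id_list).getD u 0 ∧ (pvIdx id_list).getD u 0 < (id_list.length : Int) := by
  have hkeys : (pvIdx id_list).keys = PySem.Set.ofList id_list := by
    unfold pvIdx
    rw [PySem.Dict.keys_foldl_insert_key (PySem.List.enumerate id_list)
        (fun p => p.2) (fun _ p => p.1) PySem.Dict.empty]
    rw [show (PySem.Dict.empty : PySem.Dict String Int).keys = [] from rfl,
        PySem.Set.update_nil_left, PySem.List.map_snd_enumerate]
  have hmem : u ∈ (pvIdx id_list).keys := by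
    rw [hkeys, PySem.Set.mem_ofList]; exact hu
  have hcont : (pvIdx id_list).contains u = true :=
    (PySem.Dict.contains_iff_mem_keys _ _).mpr hmem
  rw [PySem.Dict.contains_eq_isSome_get?] at hcont
  cases hg : (pvIdx id_list).get? u with
  | none => rw [hg] at hcont; simp at hcont
  | some v =>
    rw [PySem.Dict.getD_eq_get?_getD, hg]
    simp only [Option.getD_some]
    unfold pvIdx at hg
    refine pv_idx_values (PySem.List.enumerate id_list) PySem.Dict.empty (id_list.length : Int)
      ?_ ?_ u v hg
    · intro p hp
      rw [PySem.List.mem_enumerate_iff] at hp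
      obtain ⟨m, hm, rfl⟩ := hp
      constructor
      · simp
      · simp; omega
    · intro u v h
      rw [PySem.Dict.get?_empty] at h
      cases h

lemma pv_inc_fold_length (S : List Int) (ans : List Int) :
    (S.foldl (fun a g => PySem.List.pySetD a g (PySem.List.pyGetD a g 0 + 1)) ans).length
      = ans.length := by
  induction S generalizing ans with
  | nil => rfl
  | cons g S ih => simp [List.foldl_cons, ih, PySem.List.length_pySetD]

-- the increment fold over a list of in-range positions, read at j
lemma pv_inc_fold_getD (S : List Int) (ans : List Int)
    (hS : ∀ g ∈ S, 0 ≤ g ∧ g < (ans.length : Int)) (j : Nat) :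
    (S.foldl (fun a g => PySem.List.pySetD a g (PySem.List.pyGetD a g 0 + 1)) ans).getD j 0
      = ans.getD j 0 + (S.count (j : Int) : Int) := by
  induction S generalizing ans with
  | nil => simp
  | cons g S ih =>
    obtain ⟨hg0, hgl⟩ := hS g (List.mem_cons_self ..)
    rw [List.foldl_cons, ih _ (by
      intro x hx
      rw [PySem.List.length_pySetD]
      exact hS x (List.mem_cons_of_mem _ hx))]
    rw [PySem.List.pySetD_of_nonneg _ _ hg0,
        PySem.List.pyGetD_eq_getElem _ _ hg0 hgl]
    rw [List.count_cons]
    have hlt : g.toNat < ans.length := by omega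
    by_cases hgj : g.toNat = j
    · subst hgj
      rw [List.getD_eq_getElem?_getD, List.getElem?_set_self hlt,
          List.getD_eq_getElem (hn := hlt)]
      have hb : (g == (g.toNat : Int)) = true := by simp; omega
      rw [hb]
      simp
      omega
    · rw [List.getD_eq_getElem?_getD, List.getElem?_set_ne hgj, ← List.getD_eq_getElem?_getD]
      have hb : (g == (j : Int)) = false := by simp; omega
      rw [hb]
      simp

lemma pv_ans_fold_length (k : Int) (L : List (Int × List Int)) (ans : List Int) :
    (L.foldl (fun ans p =>
        if ((PySem.Set.ofList p.2).length : Int) < k then ans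
        else (PySem.Set.ofList p.2).foldl
          (fun a g => PySem.List.pySetD a g (PySem.List.pyGetD a g 0 + 1)) ans) ans).length
      = ans.length := by
  induction L generalizing ans with
  | nil => rfl
  | cons p L ih =>
    rw [List.foldl_cons, ih]
    split
    · rfl
    · exact pv_inc_fold_length _ _

-- A's answer loop, read at j
lemma pv_ans_fold_getD (k : Int) (L : List (Int × List Int)) (ans : List Int)
    (hL : ∀ p ∈ L, ∀ g ∈ PySem.Set.ofList p.2, 0 ≤ g ∧ g < (ans.length : Int)) (j : Nat) :
    (L.foldl (fun ans p =>
        if ((PySem.Set.ofList p.2).length : Int) < k then ans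
        else (PySem.Set.ofList p.2).foldl
          (fun a g => PySem.List.pySetD a g (PySem.List.pyGetD a g 0 + 1)) ans) ans).getD j 0
      = ans.getD j 0 + (L.map (fun p =>
          if ((PySem.Set.ofList p.2).length : Int) < k then (0 : Int)
          else ((PySem.Set.ofList p.2).count (j : Int) : Int))).sum := by
  induction L generalizing ans with
  | nil => simp
  | cons p L ih =>
    rw [List.foldl_cons, List.map_cons, List.sum_cons]
    by_cases hk : ((PySem.Set.ofList p.2).length : Int) < k
    · rw [if_pos hk]
      simp only [hk, if_pos]
      rw [ih _ (fun q hq => hL q (List.mem_cons_of_mem _ hq))]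
      ring
    · rw [if_neg hk]
      simp only [hk, if_false]
      have hlen : ((PySem.Set.ofList p.2).foldl
          (fun a g => PySem.List.pySetD a g (PySem.List.pyGetD a g 0 + 1)) ans).length = ans.length :=
        pv_inc_fold_length _ _
      rw [ih _ (fun q hq g hg => by rw [hlen]; exact hL q (List.mem_cons_of_mem _ hq) g hg)]
      rw [pv_inc_fold_getD _ _ (hL p (List.mem_cons_self ..)) j]
      ring

-- getD of the snd-keyed grouping fold (getD_foldl_modify_append transported through Prod.swap)
lemma pv_getD_foldl_modify_append_snd (l : List (Int × Int)) (d : PySem.Dict Int (List Int)) (c : Int) :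
    (l.foldl (fun d p => d.modify p.2 [] (· ++ [p.1])) d).getD c []
      = d.getD c [] ++ (l.filter (fun p => p.2 == c)).map (fun p => p.1) := by
  have h := PySem.Dict.getD_foldl_modify_append (l.map Prod.swap) d c
  rw [List.foldl_map, List.filter_map, List.map_map] at h
  simpa [Prod.swap, Function.comp_def] using h

-- the distinct givers reporting r are in bijection with the distinct pairs received by r
lemma pv_S_length (E : List (Int × Int)) (r : Int) :
    (PySem.Set.ofList (pvGivers E r)).length
      = ((PySem.Set.ofList E).filter (fun p => p.2 == r)).length := by
  have h1 : (PySem.Set.ofList (pvGivers E r)).Nodup := PySem.Set.nodup_ofList _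
  have h2 : (((PySem.Set.ofList E).filter (fun p => p.2 == r)).map (fun p => p.1)).Nodup := by
    apply List.Nodup.map_on
    · rintro ⟨a, b⟩ hx ⟨a', b'⟩ hy hf
      simp only [List.mem_filter, beq_iff_eq] at hx hy
      simp_all
    · exact (PySem.Set.nodup_ofList _).filter _
  have hperm : (PySem.Set.ofList (pvGivers E r)).Perm
      (((PySem.Set.ofList E).filter (fun p => p.2 == r)).map (fun p => p.1)) := by
    rw [List.perm_ext_iff_of_nodup h1 h2]
    intro g
    rw [PySem.Set.mem_ofList, pv_mem_givers]
    simp only [List.mem_map, List.mem_filter, beq_iff_eq]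
    constructor
    · intro h
      exact ⟨(g, r), ⟨(PySem.Set.mem_ofList _ _).mpr h, rfl⟩, rfl⟩
    · rintro ⟨⟨a, b⟩, ⟨hm, hb⟩, ha⟩
      simp only at hb ha
      subst hb; subst ha
      exact (PySem.Set.mem_ofList _ _).mp hm
  rw [hperm.length_eq, List.length_map]

lemma pv_S_count (E : List (Int × Int)) (r : Int) (j : Int) :
    ((PySem.Set.ofList (pvGivers E r)).count j : Int)
      = if (j, r) ∈ PySem.Set.ofList E then 1 else 0 := by
  by_cases h : (j, r) ∈ PySem.Set.ofList E
  · rw [if_pos h, List.count_eq_one_of_mem (PySem.Set.nodup_ofList _)]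
    · rfl
    · rw [PySem.Set.mem_ofList, pv_mem_givers]
      exact (PySem.Set.mem_ofList _ _).mp h
  · rw [if_neg h, List.count_eq_zero_of_not_mem]
    · rfl
    · rw [PySem.Set.mem_ofList, pv_mem_givers]
      intro hc
      exact h ((PySem.Set.mem_ofList _ _).mpr hc)

-- the central exchange: summing per receiver over the distinct receivers equals
-- counting, among the distinct pairs, those given by j whose receiver reached k
lemma pv_main_count (E : List (Int × Int)) (k : Int) (j : Int) :
    ((PySem.Set.ofList (E.map (fun p => p.2))).map (fun r =>
        if ((PySem.Set.ofList (pvGivers E r)).length : Int) < k then (0 : Int)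
        else ((PySem.Set.ofList (pvGivers E r)).count j : Int))).sum
      = ((((PySem.Set.ofList E).filter (fun p =>
            decide (k ≤ (((PySem.Set.ofList E).filter (fun p' => p'.2 == p.2)).length : Int)))).map
          (fun p => p.1)).count j : Int) := by
  have hcongr : ∀ r ∈ PySem.Set.ofList (E.map (fun p => p.2)),
      (if ((PySem.Set.ofList (pvGivers E r)).length : Int) < k then (0 : Int)
        else ((PySem.Set.ofList (pvGivers E r)).count j : Int))
      = if (decide ((j, r) ∈ PySem.Set.ofList E ∧
            k ≤ (((PySem.Set.ofList E).filter (fun p' => p'.2 == r)).length : Int))) = true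
        then (1 : Int) else 0 := by
    intro r _
    rw [pv_S_count, pv_S_length]
    by_cases hk : k ≤ (((PySem.Set.ofList E).filter (fun p' => p'.2 == r)).length : Int)
    · rw [if_neg (by omega)]
      by_cases hm : (j, r) ∈ PySem.Set.ofList E
      · rw [if_pos hm, if_pos (by simp [hm, hk])]
      · rw [if_neg hm, if_neg (by simp [hm])]
    · rw [if_pos (by omega), if_neg (by simp [hk])]
  rw [List.map_congr_left hcongr, PySem.List.sum_map_ite_one_zero]
  rw [List.count_eq_countP, List.countP_map]
  simp only [Function.comp_def]
  rw [List.countP_eq_length_filter, List.countP_eq_length_filter, List.filter_filter]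
  norm_cast
  have hA : ((PySem.Set.ofList (E.map (fun p => p.2))).filter (fun a =>
      decide ((j, a) ∈ PySem.Set.ofList E ∧
        k ≤ (((PySem.Set.ofList E).filter (fun p' => p'.2 == a)).length : Int)))).Nodup :=
    (PySem.Set.nodup_ofList _).filter _
  have hB : (((PySem.Set.ofList E).filter (fun a =>
      a.1 == j && decide (k ≤ (((PySem.Set.ofList E).filter (fun p' => p'.2 == a.2)).length : Int)))).map
      (fun p => p.2)).Nodup := by
    apply List.Nodup.map_on
    · rintro ⟨a, b⟩ hx ⟨a', b'⟩ hy hf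
      simp only [List.mem_filter, Bool.and_eq_true, beq_iff_eq, decide_eq_true_eq] at hx hy
      simp_all
    · exact (PySem.Set.nodup_ofList _).filter _
  have hperm : ((PySem.Set.ofList (E.map (fun p => p.2))).filter (fun a =>
      decide ((j, a) ∈ PySem.Set.ofList E ∧
        k ≤ (((PySem.Set.ofList E).filter (fun p' => p'.2 == a)).length : Int)))).Perm
      (((PySem.Set.ofList E).filter (fun a =>
      a.1 == j && decide (k ≤ (((PySem.Set.ofList E).filter (fun p' => p'.2 == a.2)).length : Int)))).map
      (fun p => p.2)) := by
    rw [List.perm_ext_iff_of_nodup hA hB]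
    intro r
    simp only [List.mem_filter, List.mem_map, Bool.and_eq_true, beq_iff_eq, decide_eq_true_eq]
    constructor
    · rintro ⟨-, hjr, hk⟩
      exact ⟨(j, r), ⟨hjr, rfl, hk⟩, rfl⟩
    · rintro ⟨⟨a, b⟩, ⟨hm, ha, hk⟩, hb⟩
      simp only at ha hb hk
      subst ha; subst hb
      refine ⟨?_, hm, hk⟩
      rw [PySem.Set.mem_ofList, List.mem_map]
      rw [PySem.Set.mem_ofList] at hm
      exact ⟨_, hm, rfl⟩
  rw [hperm.length_eq, List.length_map]

-- B's banned set, tested at the receiver of a pair of the set, is exactly the count condition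
lemma pv_banned_contains (S : List (Int × Int)) (k : Int) (p : Int × Int) (hp : p ∈ S) :
    (PySem.Set.ofList ((S.filter (fun q =>
        decide (k ≤ ((S.filter (fun q' => q'.2 == q.2)).length : Int)))).map
        (fun q => q.2))).contains p.2
      = decide (k ≤ ((S.filter (fun q' => q'.2 == p.2)).length : Int)) := by
  by_cases h : k ≤ ((S.filter (fun q' => q'.2 == p.2)).length : Int)
  · rw [decide_eq_true h]
    rw [PySem.Set.contains_iff]
    rw [PySem.Set.mem_ofList, List.mem_map]
    exact ⟨p, List.mem_filter.mpr ⟨hp, decide_eq_true h⟩, rfl⟩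
  · rw [decide_eq_false h]
    rw [Bool.eq_false_iff]
    intro hc
    rw [PySem.Set.contains_iff, PySem.Set.mem_ofList, List.mem_map] at hc
    obtain ⟨q, hq, hq2⟩ := hc
    rw [List.mem_filter, decide_eq_true_eq] at hq
    rw [← hq2] at h
    exact h hq.2

-- ===== VERDICT (by name: the statement is the Claim_ definition above) =====
theorem solution_spec : Claim_equal_solution := by
  intro id_list report k _ hpre
  unfold Spec_solution
  have hpre1 : ∀ s ∈ report, ((PySem.Str.split? s " ").getD []).length = 2 :=
    fun s hs => (hpre s hs).1
  simp only [solution, solution_alt]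
  have hidx : (PySem.List.enumerate id_list).foldl (fun d p => d.insert p.2 p.1)
      PySem.Dict.empty = pvIdx id_list := rfl
  rw [hidx]
  rw [pv_portA_dict id_list report hpre1]
  have hmapB : report.map (fun s =>
      let parts := (PySem.Str.split? s " ").getD []
      ((pvIdx id_list).getD (parts.getD 0 "") 0, (pvIdx id_list).getD (parts.getD 1 "") 0))
      = report.map (pvParse (pvIdx id_list)) := by
    apply List.map_congr_left
    intro s hs
    obtain ⟨g, r, hsplit⟩ := pv_split_two (hpre1 s hs)
    simp [hsplit, pvParse]
  rw [hmapB]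
  set E := report.map (pvParse (pvIdx id_list)) with hE_def
  set n := id_list.length with hn_def
  -- range of giver indices
  have hE : ∀ p ∈ E, 0 ≤ p.1 ∧ p.1 < (n : Int) := by
    intro p hp
    rw [hE_def, List.mem_map] at hp
    obtain ⟨s, hs, rfl⟩ := hp
    obtain ⟨g, r, hsplit⟩ := pv_split_two (hpre1 s hs)
    have hg : g ∈ id_list := (hpre s hs).2 g (by rw [hsplit]; simp)
    simp only [pvParse, hsplit]
    exact pv_idx_range id_list g hg
  -- A's dict characterised
  have hDA_getD : ∀ r, (E.foldl (fun d q => d.modify q.2 [] (· ++ [q.1]))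
      PySem.Dict.empty).getD r [] = pvGivers E r := by
    intro r
    rw [pv_getD_foldl_modify_append_snd]
    simp [pvGivers]
  have hDA_keys : (E.foldl (fun d q => d.modify q.2 [] (· ++ [q.1]))
      PySem.Dict.empty).keys = PySem.Set.ofList (E.map (fun p => p.2)) := by
    rw [PySem.Dict.keys_foldl_modify_key E (fun q => q.2) [] (fun _ q => (· ++ [q.1]))]
    rw [show (PySem.Dict.empty : PySem.Dict Int (List Int)).keys = [] from rfl,
        PySem.Set.update_nil_left]
  have hDA_nodup : (E.foldl (fun d q => d.modify q.2 [] (· ++ [q.1]))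
      PySem.Dict.empty).keys.Nodup := by
    rw [hDA_keys]; exact PySem.Set.nodup_ofList _
  have hitems : (E.foldl (fun d q => d.modify q.2 [] (· ++ [q.1]))
      PySem.Dict.empty).items
      = (PySem.Set.ofList (E.map (fun p => p.2))).map (fun r => (r, pvGivers E r)) := by
    rw [PySem.Dict.items_eq_map_keys _ hDA_nodup [], hDA_keys]
    exact List.map_congr_left (fun r _ => by rw [hDA_getD r])
  rw [hitems]
  have hrange : ∀ p ∈ (PySem.Set.ofList (E.map (fun p => p.2))).map (fun r => (r, pvGivers E r)),
      ∀ g ∈ PySem.Set.ofList p.2, 0 ≤ g ∧ g <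
        (((PySem.List.pyRange 0 (PySem.List.len id_list) 1).map (fun _ => (0 : Int))).length : Int) := by
    intro p hp g hg
    rw [List.mem_map] at hp
    obtain ⟨r, _, rfl⟩ := hp
    rw [PySem.Set.mem_ofList, pv_mem_givers] at hg
    have := hE _ hg
    simpa [PySem.List.length_pyRange_one, PySem.List.len] using this
  apply List.ext_getElem
  · rw [pv_ans_fold_length]
    simp
  · intro j hj1 hj2
    rw [List.getElem_map, PySem.List.getElem_pyRange_one]
    conv_lhs => rw [← List.getD_eq_getElem _ 0 hj1]
    rw [pv_ans_fold_getD k _ _ hrange j]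
    rw [List.map_map, zero_add]
    have hz : ∀ (L : List Int) (m : Nat), (L.map (fun _ => (0 : Int))).getD m 0 = 0 := by
      intro L m
      rw [List.getD_eq_getElem?_getD, List.getElem?_map]
      cases L[m]? <;> simp
    rw [hz]
    simp only [Function.comp_def]
    rw [pv_main_count E k (j : Int)]
    -- now both sides count, over the deduped pair set, the pairs given by j with banned receiver
    rw [zero_add]
    congr 1
    rw [List.count_eq_countP, List.countP_map]
    simp only [Function.comp_def]
    rw [List.countP_eq_length_filter, List.filter_filter]
    apply congrArg
    apply List.filter_congr
    intro p hp
    rw [pv_banned_contains (PySem.Set.ofList E) k p hp]
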